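-- pv_equiv track=rewrite | github.com/Melodiz/CodeRun | CodeRun_Boost/7327_binary_forest/solution.py | solve
-- ===== SOURCE A (Python) =====
-- def solve(n: int, a: list[int], m: int, b: list[int]) -> int:
--     zeros_a = [i for i, val in enumerate(a) if val == 0]
--     zeros_b = [i for i, val in enumerate(b) if val == 0]
--
--     suffix_ones_a = [0] * (n + 1)
--     for i in range(n - 1, -1, -1):
--         suffix_ones_a[i] = suffix_ones_a[i + 1] + a[i]
--
--     suffix_ones_b = [0] * (m + 1)
--     for i in range(m - 1, -1, -1):
--         suffix_ones_b[i] = suffix_ones_b[i + 1] + b[i]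
--
--     max_len = 0
--
--     max_len = min(suffix_ones_a[0], suffix_ones_b[0])
--
--     max_k = min(len(zeros_a), len(zeros_b))
--     for k in range(1, max_k + 1):
--         idx_a = zeros_a[k - 1]
--         idx_b = zeros_b[k - 1]
--
--         ones_in_suffix_a = suffix_ones_a[idx_a + 1]
--         ones_in_suffix_b = suffix_ones_b[idx_b + 1]
--
--         current_len = k + min(ones_in_suffix_a, ones_in_suffix_b)
--
--         if current_len > max_len:
--             max_len = current_len
--
--     return max_len
-- ===== SOURCE B (Python) =====
-- def solve(n: int, a: list[int], m: int, b: list[int]) -> int: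
--     # Two-pointer lockstep walk: advance both arrays to their next zero,
--     # keeping running "ones remaining" counters; no suffix tables, no zero lists.
--     ra = sum(a[i] for i in range(n))
--     rb = sum(b[j] for j in range(m))
--     best = min(ra, rb)
--     i = j = k = 0
--     while True:
--         while i < n and a[i] != 0:
--             ra -= a[i]
--             i += 1
--         while j < m and b[j] != 0:
--             rb -= b[j]
--             j += 1
--         if i >= n or j >= m:
--             break
--         i += 1
--         j += 1
--         k += 1
--         best = max(best, k + min(ra, rb))
--     return best
-- ===== Notes on version B (the rewrite author's own statement) =====
-- stated objective: alternative
-- what changed: Replaces A's precomputed zero-index lists and full suffix-sum arrays (plus an answer loop indexing into them) with a single two-pointer lockstep walk that advances both arrays to their next zero while decrementing running ones-remaining counters, updating the best answer on the fly.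
import Mathlib
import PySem

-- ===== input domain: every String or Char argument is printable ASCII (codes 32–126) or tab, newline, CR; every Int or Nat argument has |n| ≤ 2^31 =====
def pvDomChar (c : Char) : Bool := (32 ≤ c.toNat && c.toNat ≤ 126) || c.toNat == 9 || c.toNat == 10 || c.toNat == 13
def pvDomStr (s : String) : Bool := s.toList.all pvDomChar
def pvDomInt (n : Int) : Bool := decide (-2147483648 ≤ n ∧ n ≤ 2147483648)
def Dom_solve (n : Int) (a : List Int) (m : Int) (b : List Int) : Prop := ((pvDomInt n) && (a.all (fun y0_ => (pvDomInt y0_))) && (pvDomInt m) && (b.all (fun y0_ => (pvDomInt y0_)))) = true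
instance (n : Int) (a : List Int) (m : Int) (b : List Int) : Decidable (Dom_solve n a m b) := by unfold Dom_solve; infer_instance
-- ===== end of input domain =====

-- B replaces A's precomputed zero-index lists and suffix-sum arrays by a single
-- two-pointer lockstep walk over both arrays with running ones-remaining counters
-- (alternative decomposition, same cost).

-- ===== PORT A =====
def solve (n : Int) (a : List Int) (m : Int) (b : List Int) : Int :=
  let zeros_a := ((PySem.List.enumerate a 0).filter (fun p => p.2 == 0)).map (fun p => p.1)
  let zeros_b := ((PySem.List.enumerate b 0).filter (fun p => p.2 == 0)).map (fun p => p.1)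
  let suffix_ones_a := (PySem.List.pyRange (n - 1) (-1) (-1)).foldl
    (fun s i => PySem.List.pySetD s i (PySem.List.pyGetD s (i + 1) 0 + PySem.List.pyGetD a i 0))
    (PySem.List.pyRepeat [0] (n + 1))
  let suffix_ones_b := (PySem.List.pyRange (m - 1) (-1) (-1)).foldl
    (fun s i => PySem.List.pySetD s i (PySem.List.pyGetD s (i + 1) 0 + PySem.List.pyGetD b i 0))
    (PySem.List.pyRepeat [0] (m + 1))
  let max_len := min (PySem.List.pyGetD suffix_ones_a 0 0) (PySem.List.pyGetD suffix_ones_b 0 0)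
  let max_k : Int := min (zeros_a.length : Int) (zeros_b.length : Int)
  (PySem.List.pyRange 1 (max_k + 1) 1).foldl
    (fun max_len k =>
      let idx_a := PySem.List.pyGetD zeros_a (k - 1) 0
      let idx_b := PySem.List.pyGetD zeros_b (k - 1) 0
      let ones_in_suffix_a := PySem.List.pyGetD suffix_ones_a (idx_a + 1) 0
      let ones_in_suffix_b := PySem.List.pyGetD suffix_ones_b (idx_b + 1) 0
      let current_len := k + min ones_in_suffix_a ones_in_suffix_b
      if current_len > max_len then current_len else max_len)
    max_len

-- ===== PORT B =====
-- inner while loop: advance i past the nonzeros, decrementing the running counter r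
-- (the Nat argument is a fuel bound making the loop total; it never runs out on
-- inputs the loop condition admits)
def skipB (xs : List Int) (nn : Int) : Nat → Int → Int → Int × Int
  | 0, i, r => (i, r)
  | d + 1, i, r =>
    if i < nn ∧ ¬ PySem.List.pyGetD xs i 0 = 0 then
      skipB xs nn d (i + 1) (r - PySem.List.pyGetD xs i 0)
    else (i, r)

-- outer while True loop of B (same fuel discipline)
def loopB (a b : List Int) (nn mm : Int) : Nat → Int → Int → Int → Int → Int → Int → Int
  | 0, _, _, _, _, best, _ => best
  | d + 1, i, j, ra, rb, best, k =>
    let sa := skipB a nn (nn - i).toNat i ra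
    let sb := skipB b mm (mm - j).toNat j rb
    if sa.1 < nn ∧ sb.1 < mm then
      loopB a b nn mm d (sa.1 + 1) (sb.1 + 1) sa.2 sb.2
        (max best ((k + 1) + min sa.2 sb.2)) (k + 1)
    else best

def solve_alt (n : Int) (a : List Int) (m : Int) (b : List Int) : Int :=
  let ra := ((PySem.List.pyRange 0 n 1).map (fun i => PySem.List.pyGetD a i 0)).sum
  let rb := ((PySem.List.pyRange 0 m 1).map (fun j => PySem.List.pyGetD b j 0)).sum
  let best := min ra rb
  loopB a b n m n.toNat 0 0 ra rb best 0

-- ===== PRECONDITION & SPEC =====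
-- Pre_ is exactly the set of inputs on which the Python A returns (everywhere else it
-- raises IndexError): n and m must lie in 0..len, and no zero reached by A's answer
-- loop (the k-th zero for k up to the smaller total zero count) may lie at or past the
-- declared n/m window — equivalently the smaller total zero count is reached already
-- inside the windows.
def Pre_solve (n : Int) (a : List Int) (m : Int) (b : List Int) : Prop :=
  0 ≤ n ∧ n ≤ (a.length : Int) ∧ 0 ≤ m ∧ m ≤ (b.length : Int) ∧
  min (a.countP (fun x => x == 0)) (b.countP (fun x => x == 0))
    ≤ min ((a.take n.toNat).countP (fun x => x == 0)) ((b.take m.toNat).countP (fun x => x == 0))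
instance (n : Int) (a : List Int) (m : Int) (b : List Int) : Decidable (Pre_solve n a m b) := by
  unfold Pre_solve; infer_instance
def pvWitness_solve : Int × List Int × Int × List Int := (3, [0, 1, 1], 2, [1, 0])

def Spec_solve (n : Int) (a : List Int) (m : Int) (b : List Int) (out : Int) : Prop := out = solve_alt n a m b
instance (n : Int) (a : List Int) (m : Int) (b : List Int) (out : Int) : Decidable (Spec_solve n a m b out) := by unfold Spec_solve; infer_instance

-- ===== CLAIM (what is proved, stated in full; the proofs are below) =====
def Claim_equal_solve : Prop := ∀ (n : Int) (a : List Int) (m : Int) (b : List Int), Dom_solve n a m b → Pre_solve n a m b → Spec_solve n a m b (solve n a m b)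

-- ===== LEMMAS AND PROOFS =====

-- zAfter xs: for each zero of xs (left to right), the sum of the elements after it
def zAfter : List Int → List Int
  | [] => []
  | x :: xs => if x = 0 then xs.sum :: zAfter xs else zAfter xs

-- zidx o xs: the (absolute) indices of the zeros of xs, xs starting at position o
def zidx (o : Nat) : List Int → List Int
  | [] => []
  | x :: xs => if x = 0 then (o : Int) :: zidx (o + 1) xs else zidx (o + 1) xs

-- zfold: the common abstract answer loop, structural over the per-zero suffix-sum lists
def zfold : List Int → List Int → Int → Int → Int
  | x :: p, y :: q, best, k => zfold p q (max best ((k + 1) + min x y)) (k + 1)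
  | _, _, best, _ => best

-- idxFold: the answer loop as an index fold (A's shape after simplification)
def idxFold (p q : List Int) (best : Int) : Int :=
  (PySem.List.pyRange 1 (min (p.length : Int) (q.length : Int) + 1) 1).foldl
    (fun best k => max best (k + min (PySem.List.pyGetD p (k - 1) 0) (PySem.List.pyGetD q (k - 1) 0))) best

theorem zAfter_cons (x : Int) (xs : List Int) :
    zAfter (x :: xs) = if x = 0 then xs.sum :: zAfter xs else zAfter xs := rfl

theorem zfold_nil_left (q : List Int) (best k : Int) : zfold [] q best k = best := by
  cases q <;> rfl

theorem zfold_nil_right (p : List Int) (best k : Int) : zfold p [] best k = best := by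
  cases p <;> rfl

theorem zidx_cons (o : Nat) (x : Int) (xs : List Int) :
    zidx o (x :: xs) = if x = 0 then (o : Int) :: zidx (o + 1) xs else zidx (o + 1) xs := rfl

theorem zeros_eq (xs : List Int) (o : Nat) :
    ((PySem.List.enumerate xs (o : Int)).filter (fun p => p.2 == 0)).map (fun p => p.1)
      = zidx o xs := by
  induction xs generalizing o with
  | nil => simp [PySem.List.enumerate_nil, zidx]
  | cons x xs ih =>
    have h1 : (o : Int) + 1 = ((o + 1 : Nat) : Int) := by push_cast; ring
    rw [PySem.List.enumerate_cons, h1, List.filter_cons]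
    by_cases hx : x = 0
    · simp only [hx, zidx, if_true]
      simp only [show ((((o : Int), (0:Int)) : Int × Int).2 == 0) = true by simp]
      simp only [if_true, List.map_cons]
      rw [ih (o + 1)]
    · simp only [zidx, if_neg hx]
      simp only [show ((((o : Int), x) : Int × Int).2 == 0) = false by simpa using hx,
        Bool.false_eq_true, if_false]
      rw [ih (o + 1)]

theorem zeros_eq0 (xs : List Int) :
    ((PySem.List.enumerate xs 0).filter (fun p => p.2 == 0)).map (fun p => p.1) = zidx 0 xs := by
  have h := zeros_eq xs 0
  simpa using h

-- the suffix-sum fold of A, characterised on the window a.take na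
theorem suffix_fold (a : List Int) (na : Nat) (hna : na ≤ a.length)
    (i : Nat) (hi : i ≤ na) (s : List Int)
    (hlen : s.length = na + 1)
    (hs : ∀ j : Nat, i ≤ j → j ≤ na → s.getD j 0 = ((a.take na).drop j).sum) :
    ((PySem.List.pyRange ((i : Int) - 1) (-1) (-1)).foldl
      (fun s k => PySem.List.pySetD s k (PySem.List.pyGetD s (k + 1) 0 + PySem.List.pyGetD a k 0)) s).length
        = na + 1 ∧
    ∀ j : Nat, j ≤ na →
      ((PySem.List.pyRange ((i : Int) - 1) (-1) (-1)).foldl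
        (fun s k => PySem.List.pySetD s k (PySem.List.pyGetD s (k + 1) 0 + PySem.List.pyGetD a k 0)) s).getD j 0
          = ((a.take na).drop j).sum := by
  induction i generalizing s with
  | zero =>
    rw [show ((0 : Nat) : Int) - 1 = -1 by norm_num,
      PySem.List.pyRange_neg_one_eq_nil (by norm_num)]
    exact ⟨hlen, fun j hj => hs j (Nat.zero_le j) hj⟩
  | succ i ih =>
    rw [show ((i + 1 : Nat) : Int) - 1 = (i : Int) by push_cast; ring,
      PySem.List.pyRange_neg_one_cons (lt_of_lt_of_le (by norm_num) (Int.natCast_nonneg i)),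
      List.foldl_cons]
    have hilt : i < a.length := by omega
    have hitake : i < (a.take na).length := by
      rw [List.length_take]; omega
    have hcast : (i : Int) + 1 = ((i + 1 : Nat) : Int) := by push_cast; ring
    have hstep : PySem.List.pySetD s (i : Int)
        (PySem.List.pyGetD s ((i : Int) + 1) 0 + PySem.List.pyGetD a (i : Int) 0)
        = s.set i (((a.take na).drop i).sum) := by
      rw [hcast, PySem.List.pyGetD_natCast, PySem.List.pyGetD_natCast, PySem.List.pySetD_natCast]
      congr 1
      rw [hs (i + 1) (by omega) (by omega),
        List.getD_eq_getElem a 0 hilt,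
        List.drop_eq_getElem_cons hitake, List.sum_cons,
        List.getElem_take]
      ring
    rw [show ((i : Int)) - 1 = ((i : Nat) : Int) - 1 by norm_num, hstep]
    apply ih (by omega)
    · simpa using hlen
    · intro j hij hjl
      rcases Nat.eq_or_lt_of_le hij with h | h
      · subst h
        rw [List.getD_eq_getElem _ 0 (by simp only [List.length_set]; omega),
          List.getElem_set_self (by simp only [List.length_set]; omega)]
      · rw [List.getD_eq_getElem?_getD, List.getElem?_set_ne (by omega),
          ← List.getD_eq_getElem?_getD]
        exact hs j (by omega) hjl

theorem zidx_mem (ys : List Int) : ∀ (o : Nat), ∀ i ∈ zidx o ys,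
    ∃ jn : Nat, i = (jn : Int) ∧ o ≤ jn ∧ jn < o + ys.length := by
  induction ys with
  | nil => simp [zidx]
  | cons y ys ih =>
    intro o i hi
    unfold zidx at hi
    by_cases hy : y = 0
    · rw [if_pos hy] at hi
      rcases List.mem_cons.mp hi with h | h
      · exact ⟨o, h, le_refl _, by simp only [List.length_cons]; omega⟩
      · obtain ⟨jn, h1, h2, h3⟩ := ih (o + 1) i h
        exact ⟨jn, h1, by omega, by simp only [List.length_cons]; omega⟩
    · rw [if_neg hy] at hi
      obtain ⟨jn, h1, h2, h3⟩ := ih (o + 1) i hi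
      exact ⟨jn, h1, by omega, by simp only [List.length_cons]; omega⟩

theorem zidx_map (xs : List Int) : ∀ (ys : List Int) (o : Nat), xs.drop o = ys →
    (zidx o ys).map (fun i => (xs.drop (i.toNat + 1)).sum) = zAfter ys := by
  intro ys
  induction ys with
  | nil => intro o _; simp [zidx, zAfter]
  | cons y ys ih =>
    intro o h
    have hdrop : xs.drop (o + 1) = ys := by
      have h2 := congrArg (List.drop 1) h
      rw [List.drop_drop] at h2
      simpa [Nat.add_comm] using h2
    unfold zidx zAfter
    by_cases hy : y = 0
    · rw [if_pos hy, if_pos hy, List.map_cons, ih (o + 1) hdrop]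
      congr 1
      simp [hdrop]
    · rw [if_neg hy, if_neg hy]
      exact ih (o + 1) hdrop

theorem zidx_take (n' : Nat) : ∀ (xs : List Int) (o : Nat),
    zidx o xs = zidx o (xs.take n') ++ zidx (o + n') (xs.drop n') := by
  induction n' with
  | zero => intro xs o; simp [zidx]
  | succ n' ih =>
    intro xs o
    cases xs with
    | nil => simp [zidx]
    | cons x xs =>
      rw [List.take_succ_cons, List.drop_succ_cons, zidx_cons, zidx_cons, ih xs (o + 1),
        show o + 1 + n' = o + (n' + 1) by omega]
      by_cases hx : x = 0
      · rw [if_pos hx, if_pos hx, List.cons_append]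
      · rw [if_neg hx, if_neg hx]

theorem zidx_length (xs : List Int) : ∀ (o : Nat),
    (zidx o xs).length = xs.countP (fun x => x == 0) := by
  induction xs with
  | nil => intro o; simp [zidx]
  | cons x xs ih =>
    intro o
    rw [zidx_cons, List.countP_cons]
    by_cases hx : x = 0 <;> simp [hx, ih]

theorem suffix_getD (a : List Int) (na : Nat) (hna : na ≤ a.length) (j : Nat) (hj : j ≤ na) :
    ((PySem.List.pyRange ((na : Int) - 1) (-1) (-1)).foldl
      (fun s i => PySem.List.pySetD s i (PySem.List.pyGetD s (i + 1) 0 + PySem.List.pyGetD a i 0))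
      (PySem.List.pyRepeat [0] ((na : Int) + 1))).getD j 0 = ((a.take na).drop j).sum := by
  have hrep : PySem.List.pyRepeat [0] ((na : Int) + 1)
      = List.replicate (na + 1) (0 : Int) := by
    rw [PySem.List.pyRepeat_singleton,
      show ((na : Int) + 1).toNat = na + 1 by omega]
  rw [hrep]
  exact (suffix_fold a na hna na (le_refl _) _ (by simp) (fun j h1 h2 => by
    have hje : j = na := by omega
    rw [hje]
    have hnil : (a.take na).drop na = [] := List.drop_eq_nil_of_le (by simp)
    rw [hnil]
    simp [List.getD_eq_getElem?_getD])).2 j hj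

theorem zmap_generic (xs S : List Int)
    (hS : ∀ j : Nat, j ≤ xs.length → S.getD j 0 = (xs.drop j).sum) :
    (zidx 0 xs).map (fun i => PySem.List.pyGetD S (i + 1) 0) = zAfter xs := by
  rw [← zidx_map xs xs 0 rfl]
  apply List.map_congr_left
  intro i hi
  obtain ⟨jn, hji, _, hlt⟩ := zidx_mem xs 0 i hi
  subst hji
  have hc : ((jn : Int)) + 1 = ((jn + 1 : Nat) : Int) := by push_cast; ring
  rw [hc, PySem.List.pyGetD_natCast, hS (jn + 1) (by omega)]
  simp

theorem zlen (xs : List Int) : (zAfter xs).length = (zidx 0 xs).length := by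
  rw [← zidx_map xs xs 0 rfl]
  simp

theorem zAfter_getD (xs S : List Int)
    (hS : ∀ j : Nat, j ≤ xs.length → S.getD j 0 = (xs.drop j).sum)
    (t : Nat) (ht : t < (zidx 0 xs).length) :
    PySem.List.pyGetD (zAfter xs) (t : Int) 0 = PySem.List.pyGetD S ((zidx 0 xs).getD t 0 + 1) 0 := by
  rw [← zmap_generic xs S hS, PySem.List.pyGetD_natCast,
    List.getD_eq_getElem _ 0 (by simpa using ht), List.getElem_map,
    List.getD_eq_getElem _ 0 ht]

theorem if_gt_eq_max (acc c : Int) : (if c > acc then c else acc) = max acc c := by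
  by_cases h : acc < c
  · simp [h, max_eq_right h.le]
  · simp [h, max_eq_left (not_lt.mp h)]

-- sum(x[i] for i in range(n)) over a window is the window's sum
theorem range_map_take (xs : List Int) (na : Nat) (h : na ≤ xs.length) :
    (PySem.List.pyRange 0 (na : Int) 1).map (fun i => PySem.List.pyGetD xs i 0) = xs.take na := by
  apply List.ext_getElem
  · simp only [List.length_map, PySem.List.length_pyRange_one, List.length_take]
    omega
  · intro k h1 h2
    have hk : k < na := by
      simp only [List.length_map, PySem.List.length_pyRange_one] at h1
      omega
    have hkr : k < (PySem.List.pyRange 0 (na : Int) 1).length := by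
      simp only [PySem.List.length_pyRange_one]
      omega
    rw [List.getElem_map, PySem.List.getElem_pyRange_one, zero_add, List.getElem_take,
      show ((k : Int)) = ((k : Nat) : Int) from rfl, PySem.List.pyGetD_natCast,
      List.getD_eq_getElem xs 0 (by omega)]

-- A's port equals idxFold of the per-zero suffix-sum lists of the two windows
theorem solveA_eq_idxFold (a b : List Int) (na ma : Nat)
    (hnal : na ≤ a.length) (hmbl : ma ≤ b.length)
    (hcnt : min (a.countP (fun x => x == 0)) (b.countP (fun x => x == 0))
      ≤ min ((a.take na).countP (fun x => x == 0)) ((b.take ma).countP (fun x => x == 0))) :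
    solve (na : Int) a (ma : Int) b
      = idxFold (zAfter (a.take na)) (zAfter (b.take ma))
          (min (a.take na).sum (b.take ma).sum) := by
  unfold solve idxFold
  dsimp only
  rw [zeros_eq0 a, zeros_eq0 b]
  rw [PySem.List.pyGetD_zero, PySem.List.pyGetD_zero,
    suffix_getD a na hnal 0 (by omega), suffix_getD b ma hmbl 0 (by omega)]
  simp only [List.drop_zero]
  rw [zlen (a.take na), zlen (b.take ma)]
  have hta : (a.take na).length = na := by rw [List.length_take]; omega
  have htb : (b.take ma).length = ma := by rw [List.length_take]; omega
  have hmin : min (zidx 0 a).length (zidx 0 b).length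
      = min (zidx 0 (a.take na)).length (zidx 0 (b.take ma)).length := by
    have h1 := zidx_length a 0
    have h2 := zidx_length b 0
    have h3 := zidx_length (a.take na) 0
    have h4 := zidx_length (b.take ma) 0
    have h5 : (zidx 0 (a.take na)).length ≤ (zidx 0 a).length := by
      rw [zidx_take na a 0, List.length_append]
      omega
    have h6 : (zidx 0 (b.take ma)).length ≤ (zidx 0 b).length := by
      rw [zidx_take ma b 0, List.length_append]
      omega
    omega
  rw [show (min ((zidx 0 a).length : Int) ((zidx 0 b).length : Int))
      = min ((zidx 0 (a.take na)).length : Int) ((zidx 0 (b.take ma)).length : Int) by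
    rw [← Nat.cast_min, ← Nat.cast_min, hmin]]
  apply PySem.List.foldl_congr_mem
  intro acc k hk
  obtain ⟨hk1, hk2⟩ := (PySem.List.mem_pyRange_one).mp hk
  rw [← Nat.cast_min] at hk2
  have hkt : k - 1 = (((k - 1).toNat : Nat) : Int) := by omega
  have hlta : (k - 1).toNat < (zidx 0 (a.take na)).length := by omega
  have hltb : (k - 1).toNat < (zidx 0 (b.take ma)).length := by omega
  have hga : (zidx 0 a).getD (k - 1).toNat 0 = (zidx 0 (a.take na)).getD (k - 1).toNat 0 := by
    rw [zidx_take na a 0]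
    exact List.getD_append _ _ _ _ hlta
  have hgb : (zidx 0 b).getD (k - 1).toNat 0 = (zidx 0 (b.take ma)).getD (k - 1).toNat 0 := by
    rw [zidx_take ma b 0]
    exact List.getD_append _ _ _ _ hltb
  have hSa : ∀ j : Nat, j ≤ (a.take na).length →
      ((PySem.List.pyRange ((na : Int) - 1) (-1) (-1)).foldl
        (fun s i => PySem.List.pySetD s i (PySem.List.pyGetD s (i + 1) 0 + PySem.List.pyGetD a i 0))
        (PySem.List.pyRepeat [0] ((na : Int) + 1))).getD j 0 = ((a.take na).drop j).sum :=
    fun j hj => suffix_getD a na hnal j (by omega)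
  have hSb : ∀ j : Nat, j ≤ (b.take ma).length →
      ((PySem.List.pyRange ((ma : Int) - 1) (-1) (-1)).foldl
        (fun s i => PySem.List.pySetD s i (PySem.List.pyGetD s (i + 1) 0 + PySem.List.pyGetD b i 0))
        (PySem.List.pyRepeat [0] ((ma : Int) + 1))).getD j 0 = ((b.take ma).drop j).sum :=
    fun j hj => suffix_getD b ma hmbl j (by omega)
  rw [hkt, PySem.List.pyGetD_natCast, PySem.List.pyGetD_natCast, hga, hgb,
    zAfter_getD (a.take na) _ hSa _ hlta, zAfter_getD (b.take ma) _ hSb _ hltb]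
  exact if_gt_eq_max acc _

-- shifting a cons off both lists of an index fold
theorem pyGetD_cons_succ_int (xs : List Int) (x t : Int) (ht : 0 ≤ t) :
    PySem.List.pyGetD (x :: xs) (t + 1) 0 = PySem.List.pyGetD xs t 0 := by
  lift t to Nat using ht
  rw [show (t : Int) + 1 = ((t + 1 : Nat) : Int) by push_cast; ring,
    PySem.List.pyGetD_natCast, PySem.List.pyGetD_natCast, List.getD_cons_succ]

theorem idx_to_zfold (p : List Int) : ∀ (q : List Int) (k0 best : Int), 0 ≤ k0 →
    (PySem.List.pyRange (k0 + 1) (k0 + min (p.length : Int) (q.length : Int) + 1) 1).foldl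
      (fun best k => max best (k + min (PySem.List.pyGetD p (k - 1 - k0) 0)
        (PySem.List.pyGetD q (k - 1 - k0) 0))) best
    = zfold p q best k0 := by
  induction p with
  | nil =>
    intro q k0 best hk0
    have hmin : min ((List.nil (α := Int)).length : Int) ((q.length : Int)) = 0 := by
      simp only [List.length_nil, Nat.cast_zero]
      omega
    rw [hmin, zfold_nil_left, add_zero, PySem.List.pyRange_one_eq_nil (by omega)]
    rfl
  | cons x p ih =>
    intro q k0 best hk0
    cases q with
    | nil =>
      have hmin : min (((x :: p).length : Int)) ((List.nil (α := Int)).length : Int) = 0 := by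
        simp only [List.length_nil, Nat.cast_zero]
        omega
      rw [hmin, zfold_nil_right, add_zero, PySem.List.pyRange_one_eq_nil (by omega)]
      rfl
    | cons y q =>
      have hmin : min (((x :: p).length : Int)) (((y :: q).length : Int))
          = min ((p.length : Int)) ((q.length : Int)) + 1 := by
        simp only [List.length_cons]
        push_cast
        omega
      have hminnn : (0 : Int) ≤ min ((p.length : Int)) ((q.length : Int)) := by
        have := Int.natCast_nonneg p.length
        have := Int.natCast_nonneg q.length
        omega
      rw [hmin, PySem.List.pyRange_one_cons (by omega), List.foldl_cons]
      have hidx : k0 + 1 - 1 - k0 = (0 : Int) := by ring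
      simp only [hidx, PySem.List.pyGetD_zero_cons]
      have hcongr : (PySem.List.pyRange (k0 + 1 + 1) (k0 + (min ((p.length : Int)) ((q.length : Int)) + 1) + 1) 1).foldl
          (fun best k => max best (k + min (PySem.List.pyGetD (x :: p) (k - 1 - k0) 0)
            (PySem.List.pyGetD (y :: q) (k - 1 - k0) 0)))
          (max best ((k0 + 1) + min x y))
        = (PySem.List.pyRange ((k0 + 1) + 1) ((k0 + 1) + min ((p.length : Int)) ((q.length : Int)) + 1) 1).foldl
          (fun best k => max best (k + min (PySem.List.pyGetD p (k - 1 - (k0 + 1)) 0)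
            (PySem.List.pyGetD q (k - 1 - (k0 + 1)) 0)))
          (max best ((k0 + 1) + min x y)) := by
        rw [show k0 + (min ((p.length : Int)) ((q.length : Int)) + 1) + 1
            = (k0 + 1) + min ((p.length : Int)) ((q.length : Int)) + 1 by ring]
        apply PySem.List.foldl_congr_mem
        intro acc k hk
        obtain ⟨hk1, hk2⟩ := (PySem.List.mem_pyRange_one).mp hk
        rw [show k - 1 - k0 = (k - 1 - (k0 + 1)) + 1 by ring,
          pyGetD_cons_succ_int p x _ (by omega), pyGetD_cons_succ_int q y _ (by omega)]
      rw [hcongr, ih q (k0 + 1) _ (by omega)]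
      rfl

theorem idxFold_eq_zfold (p q : List Int) (best : Int) :
    idxFold p q best = zfold p q best 0 := by
  have h := idx_to_zfold p q 0 best le_rfl
  simp only [zero_add, sub_zero] at h
  unfold idxFold
  exact h

-- zAfter ignores a prefix of nonzeros
theorem zAfter_append_nonzero (l r : List Int) (h : ∀ x ∈ l, x ≠ 0) :
    zAfter (l ++ r) = zAfter r := by
  induction l with
  | nil => rfl
  | cons x l ih =>
    rw [List.cons_append, zAfter_cons, if_neg (h x (List.mem_cons_self))]
    exact ih (fun y hy => h y (List.mem_cons_of_mem x hy))

theorem takeWhile_length_le {α : Type} (p : α → Bool) (l : List α) :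
    (l.takeWhile p).length ≤ l.length := by
  induction l with
  | nil => simp
  | cons x l ih =>
    rw [List.takeWhile_cons]
    split
    · simp only [List.length_cons]; omega
    · simp

theorem dropWhile_cons_head {α : Type} (p : α → Bool) (l : List α) (x : α) (xs : List α)
    (h : l.dropWhile p = x :: xs) : p x = false := by
  induction l with
  | nil => simp at h
  | cons y l ih =>
    rw [List.dropWhile_cons] at h
    split at h
    · exact ih h
    · next hy =>
      cases h
      simpa using hy

-- skipB computes: advance to the first zero of the window suffix, with the suffix sum
theorem skipB_spec (xs : List Int) (nn' : Nat) (h : nn' ≤ xs.length) :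
    ∀ (d i : Nat), nn' - i = d → i ≤ nn' →
    skipB xs (nn' : Int) d (i : Int) (((xs.take nn').drop i).sum)
      = (((i + (((xs.take nn').drop i).takeWhile (fun x => x != 0)).length : Nat) : Int),
         (((xs.take nn').drop i).dropWhile (fun x => x != 0)).sum) := by
  intro d
  induction d with
  | zero =>
    intro i hd hi
    have hnil : (xs.take nn').drop i = [] :=
      List.drop_eq_nil_of_le (by rw [List.length_take]; omega)
    rw [hnil, skipB]
    simp
  | succ d ih =>
    intro i hd hi
    have hilt : i < nn' := by omega
    have hitake : i < (xs.take nn').length := by rw [List.length_take]; omega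
    have hxlt : i < xs.length := by omega
    have hcons : (xs.take nn').drop i = (xs.take nn')[i] :: (xs.take nn').drop (i + 1) :=
      List.drop_eq_getElem_cons hitake
    have hget : (xs.take nn')[i] = xs[i] := List.getElem_take
    have hpy : PySem.List.pyGetD xs (i : Int) 0 = xs[i] := by
      rw [PySem.List.pyGetD_natCast, List.getD_eq_getElem xs 0 hxlt]
    by_cases hx : xs[i] = 0
    · -- found a zero: stop here
      rw [skipB, if_neg (by
        push_neg
        intro _
        rw [hpy, hx])]
      rw [hcons, hget, hx]
      have htw : ((0 : Int) :: (xs.take nn').drop (i + 1)).takeWhile (fun x => x != 0) = [] := by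
        rw [List.takeWhile_cons_of_neg]
        simp
      have hdw : ((0 : Int) :: (xs.take nn').drop (i + 1)).dropWhile (fun x => x != 0)
          = (0 : Int) :: (xs.take nn').drop (i + 1) := by
        rw [List.dropWhile_cons_of_neg]
        simp
      rw [htw, hdw]
      simp
    · -- nonzero: step
      rw [skipB, if_pos (by
        constructor
        · exact_mod_cast hilt
        · rw [hpy]; exact hx)]
      have hsum : ((xs.take nn').drop i).sum - PySem.List.pyGetD xs (i : Int) 0
          = ((xs.take nn').drop (i + 1)).sum := by
        rw [hcons, hget, List.sum_cons, hpy]; ring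
      rw [hsum, show (i : Int) + 1 = ((i + 1 : Nat) : Int) by push_cast; ring,
        ih (i + 1) (by omega) (by omega)]
      rw [hcons, hget, List.takeWhile_cons_of_pos (by simpa using hx),
        List.dropWhile_cons_of_pos (by simpa using hx)]
      simp only [List.length_cons, Prod.mk.injEq]
      refine ⟨?_, trivial⟩
      push_cast
      ring

-- the two-pointer loop of B computes zfold of the per-zero suffix-sum lists
theorem loopB_spec (a b : List Int) (nn' mm' : Nat) (ha : nn' ≤ a.length) (hb : mm' ≤ b.length) :
    ∀ (d i j : Nat), nn' - i ≤ d → i ≤ nn' → j ≤ mm' → ∀ (best k : Int),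
    loopB a b (nn' : Int) (mm' : Int) d (i : Int) (j : Int)
      (((a.take nn').drop i).sum) (((b.take mm').drop j).sum) best k
      = zfold (zAfter ((a.take nn').drop i)) (zAfter ((b.take mm').drop j)) best k := by
  intro d
  induction d with
  | zero =>
    intro i j hd hi hj best k
    have hnil : (a.take nn').drop i = [] :=
      List.drop_eq_nil_of_le (by rw [List.length_take]; omega)
    rw [loopB, hnil, show zAfter [] = [] from rfl, zfold_nil_left]
  | succ d ih =>
    intro i j hd hi hj best k
    set u := (a.take nn').drop i with hu
    set v := (b.take mm').drop j with hv
    have hulen : u.length = nn' - i := by rw [hu, List.length_drop, List.length_take]; omega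
    have hvlen : v.length = mm' - j := by rw [hv, List.length_drop, List.length_take]; omega
    have hsa := skipB_spec a nn' ha (nn' - i) i rfl hi
    have hsb := skipB_spec b mm' hb (mm' - j) j rfl hj
    rw [← hu] at hsa
    rw [← hv] at hsb
    have hfa : (((nn' : Nat) : Int) - ((i : Nat) : Int)).toNat = nn' - i := by omega
    have hfb : (((mm' : Nat) : Int) - ((j : Nat) : Int)).toNat = mm' - j := by omega
    set ta := (u.takeWhile (fun x => x != 0)).length with hta
    set tb := (v.takeWhile (fun x => x != 0)).length with htb
    have htau : ta ≤ u.length := by rw [hta]; exact takeWhile_length_le _ _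
    have htbv : tb ≤ v.length := by rw [htb]; exact takeWhile_length_le _ _
    have hu_split : u.takeWhile (fun x => x != 0) ++ u.dropWhile (fun x => x != 0) = u :=
      List.takeWhile_append_dropWhile
    have hv_split : v.takeWhile (fun x => x != 0) ++ v.dropWhile (fun x => x != 0) = v :=
      List.takeWhile_append_dropWhile
    have hdwu_len : (u.dropWhile (fun x => x != 0)).length = u.length - ta := by
      have := congrArg List.length hu_split
      rw [List.length_append] at this
      omega
    have hdwv_len : (v.dropWhile (fun x => x != 0)).length = v.length - tb := by
      have := congrArg List.length hv_split
      rw [List.length_append] at this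
      omega
    have hzu : zAfter u = zAfter (u.dropWhile (fun x => x != 0)) := by
      conv_lhs => rw [← hu_split]
      exact zAfter_append_nonzero _ _ (fun x hx => by
        have := List.mem_takeWhile_imp hx
        simpa using this)
    have hzv : zAfter v = zAfter (v.dropWhile (fun x => x != 0)) := by
      conv_lhs => rw [← hv_split]
      exact zAfter_append_nonzero _ _ (fun x hx => by
        have := List.mem_takeWhile_imp hx
        simpa using this)
    have hdrop_u : (a.take nn').drop (i + ta) = u.dropWhile (fun x => x != 0) := by
      have h1 : (a.take nn').drop (i + ta) = u.drop ta := by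
        rw [hu, List.drop_drop]
      have h2 : u.drop ta = (u.takeWhile (fun x => x != 0) ++ u.dropWhile (fun x => x != 0)).drop ta := by
        rw [hu_split]
      rw [h1, h2, List.drop_append_of_le_length (le_of_eq hta), hta, List.drop_length,
        List.nil_append]
    have hdrop_v : (b.take mm').drop (j + tb) = v.dropWhile (fun x => x != 0) := by
      have h1 : (b.take mm').drop (j + tb) = v.drop tb := by
        rw [hv, List.drop_drop]
      have h2 : v.drop tb = (v.takeWhile (fun x => x != 0) ++ v.dropWhile (fun x => x != 0)).drop tb := by
        rw [hv_split]
      rw [h1, h2, List.drop_append_of_le_length (le_of_eq htb), htb, List.drop_length,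
        List.nil_append]
    rw [loopB]
    rw [hfa, hfb, hsa, hsb]
    dsimp only
    by_cases hcond : (((i + ta : Nat) : Int) < ((nn' : Nat) : Int) ∧ ((j + tb : Nat) : Int) < ((mm' : Nat) : Int))
    · -- both windows still hold a zero
      have hta_lt : i + ta < nn' := by exact_mod_cast hcond.1
      have htb_lt : j + tb < mm' := by exact_mod_cast hcond.2
      have hdwu_ne : u.dropWhile (fun x => x != 0) ≠ [] := by
        intro habs
        rw [habs] at hdwu_len
        simp at hdwu_len
        omega
      have hdwv_ne : v.dropWhile (fun x => x != 0) ≠ [] := by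
        intro habs
        rw [habs] at hdwv_len
        simp at hdwv_len
        omega
      obtain ⟨ua, ua', hua⟩ := List.exists_cons_of_ne_nil hdwu_ne
      obtain ⟨vb, vb', hvb⟩ := List.exists_cons_of_ne_nil hdwv_ne
      have hua0 : ua = 0 := by
        have h0 := dropWhile_cons_head (fun x : Int => x != 0) u ua ua' hua
        simpa using h0
      have hvb0 : vb = 0 := by
        have h0 := dropWhile_cons_head (fun x : Int => x != 0) v vb vb' hvb
        simpa using h0
      have hdrop_u' : (a.take nn').drop (i + ta + 1) = ua' := by
        have h1 : (a.take nn').drop (i + ta + 1) = ((a.take nn').drop (i + ta)).drop 1 := by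
          rw [List.drop_drop]
        rw [h1, hdrop_u, hua, List.drop_one, List.tail_cons]
      have hdrop_v' : (b.take mm').drop (j + tb + 1) = vb' := by
        have h1 : (b.take mm').drop (j + tb + 1) = ((b.take mm').drop (j + tb)).drop 1 := by
          rw [List.drop_drop]
        rw [h1, hdrop_v, hvb, List.drop_one, List.tail_cons]
      rw [if_pos hcond]
      have hsum_u : (u.dropWhile (fun x => x != 0)).sum = ((a.take nn').drop (i + ta + 1)).sum := by
        rw [hdrop_u', hua, hua0, List.sum_cons, zero_add]
      have hsum_v : (v.dropWhile (fun x => x != 0)).sum = ((b.take mm').drop (j + tb + 1)).sum := by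
        rw [hdrop_v', hvb, hvb0, List.sum_cons, zero_add]
      rw [hsum_u, hsum_v,
        show ((i + ta : Nat) : Int) + 1 = ((i + ta + 1 : Nat) : Int) by push_cast; ring,
        show ((j + tb : Nat) : Int) + 1 = ((j + tb + 1 : Nat) : Int) by push_cast; ring,
        ih (i + ta + 1) (j + tb + 1) (by omega) (by omega) (by omega) _ _]
      rw [hdrop_u', hdrop_v', hzu, hzv, hua, hvb, hua0, hvb0,
        show zAfter ((0 : Int) :: ua') = ua'.sum :: zAfter ua' by rw [zAfter_cons, if_pos rfl],
        show zAfter ((0 : Int) :: vb') = vb'.sum :: zAfter vb' by rw [zAfter_cons, if_pos rfl]]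
      rfl
    · -- one window has no zero left: both loops stop
      rw [if_neg hcond]
      push_neg at hcond
      by_cases hua : ((i + ta : Nat) : Int) < ((nn' : Nat) : Int)
      · -- then the b side is exhausted
        have hjtb : mm' ≤ j + tb := by exact_mod_cast hcond hua
        have hdwv : v.dropWhile (fun x => x != 0) = [] := by
          apply List.eq_nil_of_length_eq_zero
          omega
        rw [hzv, hdwv, show zAfter [] = [] from rfl, zfold_nil_right]
      · have hita : nn' ≤ i + ta := by
          have h1 := not_lt.mp hua
          exact_mod_cast h1
        have hdwu : u.dropWhile (fun x => x != 0) = [] := by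
          apply List.eq_nil_of_length_eq_zero
          omega
        rw [hzu, hdwu, show zAfter [] = [] from rfl, zfold_nil_left]

-- ===== VERDICT (by name: the statement is the Claim_ definition above) =====
theorem solve_spec : Claim_equal_solve := by
  intro n a m b _ hpre
  obtain ⟨hn0, hnl, hm0, hml, hcnt⟩ := hpre
  lift n to Nat using hn0 with na
  lift m to Nat using hm0 with ma
  have hnal : na ≤ a.length := by exact_mod_cast hnl
  have hmbl : ma ≤ b.length := by exact_mod_cast hml
  simp only [Int.toNat_natCast] at hcnt
  unfold Spec_solve
  rw [solveA_eq_idxFold a b na ma hnal hmbl hcnt, idxFold_eq_zfold]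
  unfold solve_alt
  dsimp only
  rw [range_map_take a na hnal, range_map_take b ma hmbl,
    show ((na : Int)).toNat = na from Int.toNat_natCast na]
  have h := loopB_spec a b na ma hnal hmbl na 0 0 (by omega) (by omega) (by omega)
    (min (a.take na).sum (b.take ma).sum) 0
  simp only [List.drop_zero, Nat.cast_zero] at h
  exact h.symm
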